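-- pv_equiv track=rewrite | github.com/IFT3275-Securite-Informatique/devoir-1-cryptographie-groupe-67 | student_code.py | sort_syms
-- ===== SOURCE A (Python) =====
-- from collections import Counter
--
-- def sort_syms(text):
--     sym_count = Counter(text)
--     bi_count = Counter(text[i:i + 2] for i in range(len(text) - 1))
--     tri_count = Counter(text[i:i + 3] for i in range(len(text) - 2))
--
--     sym_total = len(sym_count)
--     extra = 256 - sym_total
--     bigrams = [item for item, _ in bi_count.most_common(extra)]
--     trigrams = [item for item, _ in tri_count.most_common(extra // 2)]
--
--     syms = list(sym_count.keys()) + bigrams + trigrams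
--     return sorted(syms, key=lambda s: sym_count.get(s, 0), reverse=True)
-- ===== SOURCE B (Python) =====
-- from collections import Counter
--
-- def sort_syms(text):
--     # sym_count counts single characters only, so every bigram/trigram key is 0 in
--     # A's final keyed sort; a stable sort therefore just moves the chars (ordered by
--     # count, descending, insertion-stable = most_common order) in front of the
--     # bigrams and trigrams, which keep their most_common order.  No final sort needed.
--     sym_count = Counter(text)
--     extra = 256 - len(sym_count)
--     chars = [c for c, _ in sym_count.most_common()]
--     bigrams = [b for b, _ in Counter(text[i:i + 2] for i in range(len(text) - 1)).most_common(extra)]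
--     trigrams = [t for t, _ in Counter(text[i:i + 3] for i in range(len(text) - 2)).most_common(extra // 2)]
--     return chars + bigrams + trigrams
-- ===== Notes on version B (the rewrite author's own statement) =====
-- stated objective: simpler
-- what changed: B drops A's final keyed stable sort entirely: since sym_count only counts single characters, every bigram/trigram gets sort key 0, so the result is just most_common() of the chars followed by the bigram and trigram lists unchanged; B returns chars + bigrams + trigrams directly.
import Mathlib
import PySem

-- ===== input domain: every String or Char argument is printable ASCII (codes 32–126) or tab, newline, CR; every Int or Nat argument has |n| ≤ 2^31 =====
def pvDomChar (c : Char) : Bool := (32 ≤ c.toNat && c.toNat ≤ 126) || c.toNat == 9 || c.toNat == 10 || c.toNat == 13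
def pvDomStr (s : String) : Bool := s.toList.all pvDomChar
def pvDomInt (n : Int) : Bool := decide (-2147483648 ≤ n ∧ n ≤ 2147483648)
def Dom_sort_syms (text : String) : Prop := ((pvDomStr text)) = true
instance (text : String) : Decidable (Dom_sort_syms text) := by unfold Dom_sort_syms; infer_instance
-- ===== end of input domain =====

-- B drops A's final keyed stable sort: bigrams/trigrams all have sym_count key 0, so the
-- result is most_common() of the chars followed by the bigram and trigram lists unchanged (simpler).

-- ===== PORT A =====
def sort_syms (text : String) : List String :=
  let t := text.toList
  let sym_count := PySem.Dict.counter (t.map (fun c => [c]))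
  let bi_count := PySem.Dict.counter
    ((PySem.List.pyRange 0 (PySem.List.len t - 1) 1).map (fun i => PySem.List.slice t (some i) (some (i + 2))))
  let tri_count := PySem.Dict.counter
    ((PySem.List.pyRange 0 (PySem.List.len t - 2) 1).map (fun i => PySem.List.slice t (some i) (some (i + 3))))
  let sym_total : Int := sym_count.size
  let extra : Int := 256 - sym_total
  let bigrams := ((PySem.List.sorted bi_count.items (fun p => p.2) true).take extra.toNat).map (fun p => p.1)
  let trigrams := ((PySem.List.sorted tri_count.items (fun p => p.2) true).take (PySem.Int.floordiv extra 2).toNat).map (fun p => p.1)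
  let syms := sym_count.keys ++ bigrams ++ trigrams
  (PySem.List.sorted syms (fun s => sym_count.getD s 0) true).map String.mk

-- ===== PORT B =====
-- Counter.most_common() / most_common(n): stable sort of the items by count, descending
def pvMostCommonAll (d : PySem.Dict (List Char) Int) : List (List Char) :=
  (PySem.List.sorted d.items (fun p => p.2) true).map (fun p => p.1)

def pvMostCommonN (d : PySem.Dict (List Char) Int) (n : Int) : List (List Char) :=
  ((PySem.List.sorted d.items (fun p => p.2) true).take n.toNat).map (fun p => p.1)

def sort_syms_alt (text : String) : List String :=
  let t := text.toList
  let sym_count := PySem.Dict.counter (t.map (fun c => [c]))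
  let extra : Int := 256 - (sym_count.size : Int)
  let chars := pvMostCommonAll sym_count
  let bigrams := pvMostCommonN (PySem.Dict.counter
    ((PySem.List.pyRange 0 (PySem.List.len t - 1) 1).map (fun i => PySem.List.slice t (some i) (some (i + 2))))) extra
  let trigrams := pvMostCommonN (PySem.Dict.counter
    ((PySem.List.pyRange 0 (PySem.List.len t - 2) 1).map (fun i => PySem.List.slice t (some i) (some (i + 3))))) (PySem.Int.floordiv extra 2)
  (chars ++ bigrams ++ trigrams).map String.mk

-- ===== PRECONDITION & SPEC =====
def Spec_sort_syms (text : String) (out : List String) : Prop := out = sort_syms_alt text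
instance (text : String) (out : List String) : Decidable (Spec_sort_syms text out) := by unfold Spec_sort_syms; infer_instance

-- ===== CLAIM (what is proved, stated in full; the proofs are below) =====
def Claim_equal_sort_syms : Prop := ∀ (text : String), Dom_sort_syms text → Spec_sort_syms text (sort_syms text)

-- ===== LEMMAS AND PROOFS =====

theorem pv_insertBy_map {α β : Type} (f : α → β) (before : β → β → Bool) (x : α) (ys : List α) :
    PySem.List.insertBy before (f x) (ys.map f)
      = (PySem.List.insertBy (fun a b => before (f a) (f b)) x ys).map f := by
  induction ys with
  | nil => simp [PySem.List.insertBy]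
  | cons y ys ih =>
    simp only [List.map, PySem.List.insertBy]
    by_cases h : before (f x) (f y) = true <;> simp [h, ih]

theorem pv_foldl_insertBy_map {α β : Type} (f : α → β) (before : β → β → Bool) :
    ∀ (xs ys : List α),
      (xs.map f).foldl (fun acc x => PySem.List.insertBy before x acc) (ys.map f)
        = (xs.foldl (fun acc x => PySem.List.insertBy (fun a b => before (f a) (f b)) x acc) ys).map f := by
  intro xs
  induction xs with
  | nil => intro ys; simp
  | cons x xs ih =>
    intro ys
    simp only [List.map, List.foldl_cons]
    rw [pv_insertBy_map f before x ys]
    exact ih _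

theorem pv_sorted_map {α β : Type} (f : α → β) (key : β → Int) (xs : List α) :
    PySem.List.sorted (xs.map f) key true
      = (PySem.List.sorted xs (fun a => key (f a)) true).map f := by
  rw [PySem.List.sorted_rev_eq_foldl_insertBy, PySem.List.sorted_rev_eq_foldl_insertBy]
  have := pv_foldl_insertBy_map f (fun a b => decide (key b < key a)) xs []
  simpa using this

theorem pv_foldl_insertBy_zeros {α : Type} (k : α → Int) :
    ∀ (ys acc : List α), (∀ y ∈ ys, k y = 0) → (∀ z ∈ acc, 0 ≤ k z) →
      ys.foldl (fun a y => PySem.List.insertBy (fun a b => decide (k b < k a)) y a) acc = acc ++ ys := by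
  intro ys
  induction ys with
  | nil => intro acc _ _; simp
  | cons y ys ih =>
    intro acc hy hacc
    have hy0 : k y = 0 := hy y (List.mem_cons_self ..)
    have hins : PySem.List.insertBy (fun a b => decide (k b < k a)) y acc = acc ++ [y] := by
      apply PySem.List.insertBy_of_forall_not_before
      intro z hz
      have := hacc z hz
      simp [hy0]; omega
    simp only [List.foldl_cons, hins]
    rw [ih (acc ++ [y]) (fun a ha => hy a (List.mem_cons_of_mem _ ha))]
    · simp
    · intro z hz
      rcases List.mem_append.mp hz with h | h
      · exact hacc z h
      · simp at h; subst h; omega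

theorem pv_sorted_append_zeros {α : Type} (k : α → Int) (xs ys : List α)
    (hys : ∀ y ∈ ys, k y = 0) (hxs : ∀ x ∈ xs, 0 ≤ k x) :
    PySem.List.sorted (xs ++ ys) k true = PySem.List.sorted xs k true ++ ys := by
  rw [PySem.List.sorted_rev_eq_foldl_insertBy, List.foldl_append,
    ← PySem.List.sorted_rev_eq_foldl_insertBy]
  exact pv_foldl_insertBy_zeros k ys _ hys
    (fun z hz => hxs z ((PySem.List.mem_sorted _ _ _ _).mp hz))

-- every element produced by most_common of a counter of n-grams is one of the n-grams
theorem pv_mem_mostCommonN (xs : List (List Char)) (n : Int) (y : List Char)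
    (hy : y ∈ pvMostCommonN (PySem.Dict.counter xs) n) : y ∈ xs := by
  unfold pvMostCommonN at hy
  rcases List.mem_map.mp hy with ⟨p, hp, rfl⟩
  have hp' := (PySem.List.mem_sorted _ _ _ _).mp (List.mem_of_mem_take hp)
  rw [PySem.Dict.items_counter] at hp'
  rcases List.mem_map.mp hp' with ⟨kk, hk, rfl⟩
  exact (PySem.Set.mem_ofList _ _).mp hk

-- bigram / trigram slices have length 2 / 3
theorem pv_len_slice_bi (t : List Char) (i : Int)
    (hi : i ∈ PySem.List.pyRange 0 (PySem.List.len t - 1) 1) :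
    (PySem.List.slice t (some i) (some (i + 2))).length = 2 := by
  rw [PySem.List.mem_pyRange_one, PySem.List.len_eq] at hi
  obtain ⟨h0, hlt⟩ := hi
  rw [PySem.List.slice_toNat t h0 (by omega)]
  simp only [List.length_take, List.length_drop]
  omega

theorem pv_len_slice_tri (t : List Char) (i : Int)
    (hi : i ∈ PySem.List.pyRange 0 (PySem.List.len t - 2) 1) :
    (PySem.List.slice t (some i) (some (i + 3))).length = 3 := by
  rw [PySem.List.mem_pyRange_one, PySem.List.len_eq] at hi
  obtain ⟨h0, hlt⟩ := hi
  rw [PySem.List.slice_toNat t h0 (by omega)]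
  simp only [List.length_take, List.length_drop]
  omega

-- count of anything that is not a single character among the singletons is zero
theorem pv_count_singletons_eq_zero (t : List Char) (y : List Char) (hy : y.length ≠ 1) :
    List.count y (t.map (fun c => [c])) = 0 := by
  rw [List.count_eq_zero]
  intro hmem
  rcases List.mem_map.mp hmem with ⟨c, _, rfl⟩
  simp at hy

-- chars by most_common = keys sorted by their count (stable, descending)
theorem pv_chars_eq (elems : List (List Char)) :
    PySem.List.sorted (PySem.Dict.counter elems).keys
        (fun s => ((List.count s elems : Nat) : Int)) true
      = pvMostCommonAll (PySem.Dict.counter elems) := by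
  unfold pvMostCommonAll
  rw [PySem.Dict.items_counter, PySem.Dict.keys_counter]
  rw [pv_sorted_map (fun k => (k, ((List.count k elems : Nat) : Int))) (fun p => p.2)
    (PySem.Set.ofList elems)]
  rw [List.map_map]
  have hid : ((fun p : (List Char) × Int => p.1) ∘ fun k => (k, ((List.count k elems : Nat) : Int))) = id := rfl
  rw [hid, List.map_id]

-- ===== VERDICT (by name: the statement is the Claim_ definition above) =====
theorem sort_syms_spec : Claim_equal_sort_syms := by
  intro text _
  show sort_syms text = sort_syms_alt text
  unfold sort_syms sort_syms_alt pvMostCommonN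
  set t := text.toList with ht
  set elems := t.map (fun c => [c]) with helems
  set bi := (PySem.List.pyRange 0 (PySem.List.len t - 1) 1).map
    (fun i => PySem.List.slice t (some i) (some (i + 2))) with hbi
  set tri := (PySem.List.pyRange 0 (PySem.List.len t - 2) 1).map
    (fun i => PySem.List.slice t (some i) (some (i + 3))) with htri
  simp only [PySem.Dict.getD_counter]
  set extra : Int := 256 - ((PySem.Dict.counter elems).size : Int) with hextra
  set bigrams := ((PySem.List.sorted (PySem.Dict.counter bi).items (fun p => p.2) true).take
    extra.toNat).map (fun p => p.1) with hbigrams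
  set trigrams := ((PySem.List.sorted (PySem.Dict.counter tri).items (fun p => p.2) true).take
    (PySem.Int.floordiv extra 2).toNat).map (fun p => p.1) with htrigrams
  have hzero : ∀ y ∈ bigrams ++ trigrams, ((List.count y elems : Nat) : Int) = 0 := by
    intro y hy
    have hlen : y.length ≠ 1 := by
      rcases List.mem_append.mp hy with h | h
      · have hmem : y ∈ pvMostCommonN (PySem.Dict.counter bi) extra := h
        rcases List.mem_map.mp (pv_mem_mostCommonN bi extra y hmem) with ⟨i, hi, rfl⟩
        rw [pv_len_slice_bi t i hi]; omega
      · have hmem : y ∈ pvMostCommonN (PySem.Dict.counter tri) (PySem.Int.floordiv extra 2) := h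
        rcases List.mem_map.mp (pv_mem_mostCommonN tri _ y hmem) with ⟨i, hi, rfl⟩
        rw [pv_len_slice_tri t i hi]; omega
    rw [helems, pv_count_singletons_eq_zero t y hlen]
    simp
  rw [List.append_assoc]
  rw [pv_sorted_append_zeros _ _ _ hzero (fun x _ => Int.natCast_nonneg _)]
  rw [pv_chars_eq elems]
  rw [← List.append_assoc]
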